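-- pv_equiv track=rewrite | github.com/ShivsaranshThakur1-Coder/fdml-core | scripts/m23_validator_expansion.py | merge_file_failures
-- ===== SOURCE A (Python) =====
-- def merge_file_failures(
--     left: dict[str, list[str]],
--     right: dict[str, list[str]],
-- ) -> dict[str, list[str]]:
--     out: dict[str, list[str]] = {}
--     for payload in (left, right):
--         for file_name, rules in payload.items():
--             if not file_name:
--                 continue
--             out.setdefault(file_name, [])
--             out[file_name].extend([str(r) for r in rules if str(r)])
--     return {name: sorted(set(values)) for name, values in out.items()}
-- ===== SOURCE B (Python) =====
-- def merge_file_failures(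
--     left: dict[str, list[str]],
--     right: dict[str, list[str]],
-- ) -> dict[str, list[str]]:
--     out = {k: [] for payload in (left, right) for k in payload if k}
--     flat = {(k, str(r)) for payload in (left, right)
--             for k, rules in payload.items() if k
--             for r in rules if str(r)}
--     for k, s in sorted(flat, key=lambda kv: kv[1]):
--         out[k].append(s)
--     return out
-- ===== Notes on version B (the rewrite author's own statement) =====
-- stated objective: alternative
-- what changed: A accumulates per-key value lists in a dict during a two-dict sweep and then sorts a set per key; B instead flattens both dicts into ONE global set of (key, value) pairs, performs a single stable sort of that set by value, and groups the pairs back into a pre-seeded key->[] dict by appending, so no per-key set/sort ever happens.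
import Mathlib
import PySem

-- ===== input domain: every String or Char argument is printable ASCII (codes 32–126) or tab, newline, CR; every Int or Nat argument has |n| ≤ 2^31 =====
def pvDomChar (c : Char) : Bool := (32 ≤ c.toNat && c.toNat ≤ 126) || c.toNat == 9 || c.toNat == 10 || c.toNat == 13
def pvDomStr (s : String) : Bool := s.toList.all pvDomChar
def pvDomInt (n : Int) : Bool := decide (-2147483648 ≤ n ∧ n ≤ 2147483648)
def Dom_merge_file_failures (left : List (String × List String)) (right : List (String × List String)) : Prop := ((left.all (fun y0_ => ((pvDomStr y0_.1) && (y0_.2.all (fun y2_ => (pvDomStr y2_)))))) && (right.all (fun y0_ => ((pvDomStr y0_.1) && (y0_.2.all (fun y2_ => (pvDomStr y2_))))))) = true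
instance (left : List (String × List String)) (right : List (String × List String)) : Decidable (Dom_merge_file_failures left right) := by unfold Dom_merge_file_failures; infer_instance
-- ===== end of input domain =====

-- B replaces A's per-key accumulate-then-set-sort by: flatten both dicts into one global set of
-- (key, value) pairs, ONE stable sort of that set by value, then group back into a pre-seeded
-- key -> [] dict by appending (objective: alternative algorithm, same asymptotics).


-- ===== PORT A =====
-- the loop body over payload.items(): 'if not file_name: continue; out.setdefault(file_name, []);
-- out[file_name].extend([str(r) for r in rules if str(r)])' — str(r) on a str is the identity,
-- so the comprehension is a filter keeping the nonempty strings.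
def mergePayloadA (out : PySem.Dict String (List String))
    (payload : List (String × List String)) : PySem.Dict String (List String) :=
  payload.foldl (fun out p =>
    if p.1 = "" then out
    else
      let out1 := out.setdefault p.1 []
      out1.insert p.1 (out1.getD p.1 [] ++ p.2.filter (fun r => r ≠ ""))) out

def merge_file_failures (left : List (String × List String)) (right : List (String × List String)) : List (String × List String) :=
  -- final comprehension {name: sorted(set(values)) for …} (sorted-of-a-set: order-insensitive)
  (mergePayloadA (mergePayloadA PySem.Dict.empty left) right).items.map (fun p => (p.1, PySem.List.sorted (PySem.Set.ofList p.2) (fun s => s) false))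

-- ===== PORT B =====
-- out = {k: [] for payload in (left, right) for k in payload if k}
-- flat = {(k, str(r)) for payload in (left, right) for k, rules in payload.items() if k for r in rules if str(r)}
-- for k, s in sorted(flat, key=lambda kv: kv[1]): out[k].append(s)     (str(r) on a str is identity)
-- out = {k: [] for payload in (left, right) for k in payload if k}
def seedB (left : List (String × List String)) (right : List (String × List String)) : PySem.Dict String (List String) :=
  (((left ++ right).map Prod.fst).filter (fun k => k ≠ "")).foldl
    (fun d k => d.insert k ([] : List String)) PySem.Dict.empty

-- the inner generator of the flat set: '(k, str(r)) … if k … for r in rules if str(r)'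
def gpairB (q : String × List String) : List (String × String) :=
  if q.1 = "" then [] else (q.2.filter (fun s => s ≠ "")).map (fun s => (q.1, s))

-- sorted(flat, key=lambda kv: kv[1])
def flatB (left : List (String × List String)) (right : List (String × List String)) : List (String × String) :=
  PySem.List.sorted (PySem.Set.ofList ((left ++ right).flatMap gpairB)) (fun p => p.2) false

-- the grouping loop 'for k, s in …: out[k].append(s)', then return out
def merge_file_failures_alt (left : List (String × List String)) (right : List (String × List String)) : List (String × List String) :=
  ((flatB left right).foldl (fun d p => d.modify p.1 [] (fun l => l ++ [p.2])) (seedB left right)).items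

-- ===== PRECONDITION & SPEC =====
-- Pre_ requires each association list to carry pairwise-distinct keys: the parameters stand for
-- Python dicts, which cannot hold a duplicate key, so no Python-reachable input is excluded.
def Pre_merge_file_failures (left : List (String × List String)) (right : List (String × List String)) : Prop :=
  (left.map Prod.fst).Nodup ∧ (right.map Prod.fst).Nodup
instance (left : List (String × List String)) (right : List (String × List String)) : Decidable (Pre_merge_file_failures left right) := by unfold Pre_merge_file_failures; infer_instance

def pvWitness_merge_file_failures : (List (String × List String)) × (List (String × List String)) :=
  ([("a.py", ["r2", "r1", "r2"]), ("", ["x"]), ("b.py", ["r3", ""])],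
   [("b.py", ["r1"]), ("c.py", [])])

def Spec_merge_file_failures (left : List (String × List String)) (right : List (String × List String)) (out : List (String × List String)) : Prop := out = merge_file_failures_alt left right
instance (left : List (String × List String)) (right : List (String × List String)) (out : List (String × List String)) : Decidable (Spec_merge_file_failures left right out) := by unfold Spec_merge_file_failures; infer_instance

-- ===== CLAIM (what is proved, stated in full; the proofs are below) =====
def Claim_equal_merge_file_failures : Prop := ∀ (left : List (String × List String)) (right : List (String × List String)), Dom_merge_file_failures left right → Pre_merge_file_failures left right → Spec_merge_file_failures left right (merge_file_failures left right)

-- ===== LEMMAS AND PROOFS =====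

-- common middle form: A's result written as a comprehension over the deduped nonempty keys
def mergeBSpec (left : List (String × List String)) (right : List (String × List String)) : List (String × List String) :=
  (PySem.List.dedup (((left.map Prod.fst) ++ (right.map Prod.fst)).filter (fun k => k ≠ ""))).map (fun k =>
    (k, PySem.List.sorted
          (PySem.Set.ofList
            (((PySem.Dict.mk left).getD k [] ++ (PySem.Dict.mk right).getD k []).filter (fun s => s ≠ "")))
          (fun s => s) false))

def fvalP (payload : List (String × List String)) (k : String) : List String :=
  ((PySem.Dict.mk payload).getD k []).filter (fun s => s ≠ "")

theorem fvalP_cons (q : String × List String) (rest : List (String × List String)) (k : String) :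
    fvalP (q :: rest) k = if q.1 = k then q.2.filter (fun s => s ≠ "") else fvalP rest k := by
  obtain ⟨a, b⟩ := q
  simp only [fvalP, PySem.Dict.getD, PySem.Dict.get?_mk_cons, beq_iff_eq]
  split <;> simp

theorem fvalP_of_not_mem (payload : List (String × List String)) (k : String)
    (h : k ∉ payload.map Prod.fst) : fvalP payload k = [] := by
  have : (PySem.Dict.mk payload).get? k = none := by
    rw [PySem.Dict.get?_eq_none_iff_not_mem_keys]
    simpa [PySem.Dict.keys_mk] using h
  simp [fvalP, PySem.Dict.getD, this]

theorem mergePayloadA_items (payload : List (String × List String))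
    (d : PySem.Dict String (List String))
    (hnd : d.keys.Nodup) (hne : "" ∉ d.keys)
    (hp : (payload.map Prod.fst).Nodup) :
    (mergePayloadA d payload).items =
      d.items.map (fun p => (p.1, p.2 ++ fvalP payload p.1)) ++
      (payload.filter (fun q => q.1 ≠ "" ∧ ¬ d.contains q.1)).map
        (fun q => (q.1, q.2.filter (fun s => s ≠ ""))) := by
  induction payload generalizing d with
  | nil => simp [mergePayloadA, fvalP, PySem.Dict.getD, PySem.Dict.get?]
  | cons q rest ih =>
    obtain ⟨a, b⟩ := q
    simp only [List.map_cons, List.nodup_cons] at hp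
    obtain ⟨ha, hrest⟩ := hp
    have hkeymem : ∀ p ∈ d.items, p.1 ∈ d.keys := by
      intro p hpmem; simp only [PySem.Dict.keys]; exact List.mem_map_of_mem hpmem
    by_cases hae : a = ""
    · -- empty file name: skipped
      subst hae
      have hstep : mergePayloadA d (("", b) :: rest) = mergePayloadA d rest := by
        simp [mergePayloadA]
      rw [hstep, ih d hnd hne hrest]
      congr 1
      · apply List.map_congr_left
        intro p hpmem
        have hp1 : p.1 ≠ "" := fun h => hne (h ▸ hkeymem p hpmem)
        rw [fvalP_cons, if_neg (Ne.symm hp1)]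
    · by_cases hc : d.contains a = true
      · -- existing key: value extended in place
        have hsd : d.setdefault a [] = d := by simp [PySem.Dict.setdefault, hc]
        have hstep : mergePayloadA d ((a, b) :: rest) =
            mergePayloadA (d.insert a (d.getD a [] ++ b.filter (fun r => r ≠ ""))) rest := by
          simp [mergePayloadA, hae, hsd]
        set v := d.getD a [] ++ b.filter (fun r => r ≠ "") with hv
        have hkeys : (d.insert a v).keys = d.keys := PySem.Dict.keys_insert_of_contains d v hc
        rw [hstep, ih _ (hkeys ▸ hnd) (hkeys ▸ hne) hrest,
            PySem.Dict.items_insert_of_contains d v hc, List.map_map]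
        congr 1
        · apply List.map_congr_left
          intro p hpmem
          by_cases hpa : p.1 = a
          · have hpd : (a, p.2) ∈ d.items := by
              have : p = (a, p.2) := by rw [← hpa]
              exact this ▸ hpmem
            have hgd : d.getD a [] = p.2 := PySem.Dict.getD_of_mem_items d hpd hnd []
            simp only [Function.comp, hpa, beq_self_eq_true, if_pos,
              fvalP_of_not_mem rest a ha, fvalP_cons, List.append_nil, hv, hgd]
          · rw [fvalP_cons, if_neg (Ne.symm hpa)]
            simp only [Function.comp, beq_iff_eq, if_neg hpa]
        · rw [List.filter_cons]
          simp only [hc, not_true_eq_false, and_false, decide_false]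
          apply congrArg
          apply List.filter_congr
          intro x hx
          have hxa : x.1 ≠ a := fun h => ha (h ▸ List.mem_map_of_mem hx)
          simp [PySem.Dict.contains_insert, hxa]
      · -- fresh key: appended
        have hnotin : ∀ p ∈ d.items, p.1 ≠ a := by
          intro p hpmem h
          have : d.contains a = true := by
            simp only [PySem.Dict.contains, List.any_eq_true]
            exact ⟨p, hpmem, by simp [h]⟩
          exact hc this
        have hsd : d.setdefault a [] = PySem.Dict.mk (d.items ++ [(a, [])]) := by
          simp [PySem.Dict.setdefault, hc]
        set d0 := PySem.Dict.mk (d.items ++ [(a, ([] : List String))]) with hd0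
        have hc0 : d0.contains a = true := by
          simp only [hd0, PySem.Dict.contains, List.any_append, List.any_cons]
          simp
        have hg0 : d0.getD a [] = [] := by
          have : d0.get? a = some [] := by
            simp only [hd0, PySem.Dict.get?, List.find?_append]
            have : d.items.find? (fun p => p.1 == a) = none := by
              rw [List.find?_eq_none]
              intro p hpmem; simpa using hnotin p hpmem
            simp [this]
          simp [PySem.Dict.getD, this]
        have hstep : mergePayloadA d ((a, b) :: rest) =
            mergePayloadA (d0.insert a (d0.getD a [] ++ b.filter (fun r => r ≠ ""))) rest := by
          simp only [mergePayloadA, List.foldl_cons, if_neg hae, hsd]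
        set v := d0.getD a [] ++ b.filter (fun r => r ≠ "") with hv
        have hvb : v = b.filter (fun r => r ≠ "") := by rw [hv, hg0, List.nil_append]
        have hitems : (d0.insert a v).items = d.items ++ [(a, b.filter (fun r => r ≠ ""))] := by
          rw [PySem.Dict.items_insert_of_contains d0 v hc0]
          simp only [hd0, List.map_append, List.map_cons, List.map_nil,
            beq_self_eq_true, if_pos, hvb]
          have hid : List.map (fun p => if (p.1 == a) = true then (a, List.filter (fun r => decide (r ≠ "")) b) else p) d.items = d.items := by
            conv_rhs => rw [← List.map_id d.items]
            apply List.map_congr_left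
            intro p hp
            simp [hnotin p hp]
          rw [hid]
        have hkeys1 : (d0.insert a v).keys = d.keys ++ [a] := by
          simp [PySem.Dict.keys, hitems]
        have hak : a ∉ d.keys := fun h => hc (by simpa [PySem.Dict.contains_eq_decide_mem_keys] using h)
        have hnd1 : (d0.insert a v).keys.Nodup := by
          rw [hkeys1]
          refine List.Nodup.append hnd (List.nodup_singleton a) ?_
          intro x hx hx2
          rw [List.mem_singleton] at hx2
          exact hak (hx2 ▸ hx)
        have hne1 : "" ∉ (d0.insert a v).keys := by
          rw [hkeys1]
          simp only [List.mem_append, List.mem_singleton]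
          rintro (h | h)
          · exact hne h
          · exact hae h.symm
        rw [hstep, ih _ hnd1 hne1 hrest, hitems]
        rw [List.map_append, List.map_cons, List.map_nil]
        rw [List.filter_cons]
        have : (decide (a ≠ "" ∧ ¬ d.contains a = true)) = true := by
          simp [hae, hc]
        rw [if_pos this, List.map_cons]
        rw [fvalP_of_not_mem rest a ha, List.append_nil]
        rw [List.append_assoc]
        congr 1
        · apply List.map_congr_left
          intro p hpmem
          rw [fvalP_cons, if_neg (Ne.symm (hnotin p hpmem))]
        · simp only [List.singleton_append]
          have hfeq : (rest.filter (fun q => decide (q.1 ≠ "" ∧ ¬ (d0.insert a v).contains q.1 = true)))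
              = (rest.filter (fun q => decide (q.1 ≠ "" ∧ ¬ d.contains q.1 = true))) := by
            apply List.filter_congr
            intro x hx
            have hxa : x.1 ≠ a := fun h => ha (h ▸ List.mem_map_of_mem hx)
            simp only [PySem.Dict.contains, hitems, List.any_append, List.any_cons, List.any_nil]
            have hax : (a == x.1) = false := beq_eq_false_iff_ne.mpr (Ne.symm hxa)
            simp [hax]
          rw [hfeq]

theorem merge_eq (left right : List (String × List String))
    (hL : (left.map Prod.fst).Nodup) (hR : (right.map Prod.fst).Nodup) :
    merge_file_failures left right = mergeBSpec left right := by
  have hempty : (PySem.Dict.empty : PySem.Dict String (List String)).keys = [] := by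
    simp [PySem.Dict.empty, PySem.Dict.keys]
  -- the accumulator after the left sweep
  have hitems1 : (mergePayloadA PySem.Dict.empty left).items =
      (left.filter (fun q => decide (q.1 ≠ ""))).map (fun q => (q.1, q.2.filter (fun s => s ≠ ""))) := by
    rw [mergePayloadA_items left PySem.Dict.empty (by rw [hempty]; exact List.nodup_nil)
      (by rw [hempty]; exact List.not_mem_nil) hL]
    have h1 : (PySem.Dict.empty : PySem.Dict String (List String)).items = [] := rfl
    rw [h1, List.map_nil, List.nil_append]
    apply congrArg
    apply List.filter_congr
    intro x hx
    simp [PySem.Dict.contains_empty]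
  have hnd1 : (mergePayloadA PySem.Dict.empty left).keys.Nodup := by
    simp only [PySem.Dict.keys, hitems1, List.map_map]
    exact hL.sublist ((List.filter_sublist (l := left)).map _)
  have hne1 : "" ∉ (mergePayloadA PySem.Dict.empty left).keys := by
    simp only [PySem.Dict.keys, hitems1, List.map_map]
    intro h
    obtain ⟨q, hq, hq1⟩ := List.mem_map.mp h
    have := List.of_mem_filter hq
    rw [show ((fun x => x.1) ∘ fun q : String × List String => (q.1, List.filter (fun s => decide (s ≠ "")) q.2)) q = q.1 from rfl] at hq1
    simp [hq1] at this
  have hitems2 := mergePayloadA_items right _ hnd1 hne1 hR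
  -- B's key list
  have hfl : PySem.Set.ofList ((left.map Prod.fst).filter (fun k => decide (k ≠ ""))) =
      (left.map Prod.fst).filter (fun k => decide (k ≠ "")) :=
    PySem.Set.ofList_eq_self_of_nodup _ (hL.filter _)
  have hfr : PySem.Set.ofList ((right.map Prod.fst).filter (fun k => decide (k ≠ ""))) =
      (right.map Prod.fst).filter (fun k => decide (k ≠ "")) :=
    PySem.Set.ofList_eq_self_of_nodup _ (hR.filter _)
  have hkeys : PySem.List.dedup (((left.map Prod.fst) ++ (right.map Prod.fst)).filter (fun k => decide (k ≠ ""))) =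
      ((left.map Prod.fst).filter (fun k => decide (k ≠ ""))) ++
        (((right.map Prod.fst).filter (fun k => decide (k ≠ ""))).filter
          (fun y => !PySem.Set.contains ((left.map Prod.fst).filter (fun k => decide (k ≠ ""))) y)) := by
    simp only [PySem.List.dedup, List.filter_append, PySem.Set.ofList_append,
      PySem.Set.update_eq_append_filter, hfl, hfr]
  unfold merge_file_failures mergeBSpec
  rw [hkeys, List.map_append]
  rw [hitems2, hitems1, List.map_append, List.map_map, List.map_map]
  congr 1
  · -- keys coming from left
    rw [List.filter_map, List.map_map]
    apply List.map_congr_left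
    intro q hq
    have hq1 : q.1 ≠ "" := by simpa using List.of_mem_filter hq
    have hqL : q ∈ left := List.mem_of_mem_filter hq
    have hgL : (PySem.Dict.mk left).getD q.1 [] = q.2 :=
      PySem.Dict.getD_of_mem_items (PySem.Dict.mk left)
        (by simpa using hqL) (by simpa [PySem.Dict.keys_mk] using hL) []
    simp only [Function.comp, hgL, List.filter_append]
    rfl
  · -- keys coming only from right
    have hlist : List.filter (fun y => !PySem.Set.contains ((left.map Prod.fst).filter (fun k => decide (k ≠ ""))) y)
        ((right.map Prod.fst).filter (fun k => decide (k ≠ "")))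
        = (right.filter (fun q => decide (q.1 ≠ "" ∧ ¬ (mergePayloadA PySem.Dict.empty left).contains q.1 = true))).map Prod.fst := by
      rw [List.filter_filter, List.filter_map]
      apply congrArg
      apply List.filter_congr
      intro x hx
      have hkeys1 : (mergePayloadA PySem.Dict.empty left).keys =
          (left.filter (fun q => decide (q.1 ≠ ""))).map (fun x => x.1) := by
        simp [PySem.Dict.keys, hitems1, List.map_map]
      simp only [Function.comp]
      by_cases hx1 : x.1 = ""
      · simp [hx1]
      · have hmemiff : ((mergePayloadA PySem.Dict.empty left).contains x.1 = true) ↔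
            x.1 ∈ (left.map Prod.fst).filter (fun k => decide (k ≠ "")) := by
          rw [PySem.Dict.contains_eq_decide_mem_keys, hkeys1, List.filter_map]
          simp
        by_cases hm : x.1 ∈ (left.map Prod.fst).filter (fun k => decide (k ≠ ""))
        · have hcf : PySem.Set.contains ((left.map Prod.fst).filter (fun k => decide (k ≠ ""))) x.1 = true := by
            rw [PySem.Set.contains_eq_listContains]
            exact List.elem_eq_true_of_mem hm
          rw [hcf, hmemiff.mpr hm]
          simp
        · have hcd : (mergePayloadA PySem.Dict.empty left).contains x.1 = false :=
            eq_false_of_ne_true (fun h => hm (hmemiff.mp h))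
          have hcf : PySem.Set.contains ((left.map Prod.fst).filter (fun k => decide (k ≠ ""))) x.1 = false := by
            rw [PySem.Set.contains_eq_listContains]
            exact eq_false_of_ne_true (fun h => hm (List.mem_of_elem_eq_true h))
          rw [hcf, hcd]
          simp [hx1]
    rw [hlist, List.map_map, List.map_map]
    apply List.map_congr_left
    intro q hq
    have hcond := List.of_mem_filter hq
    have hqR : q ∈ right := List.mem_of_mem_filter hq
    simp only [decide_eq_true_eq] at hcond
    obtain ⟨hq1, hnc⟩ := hcond
    have hnotL : q.1 ∉ left.map Prod.fst := by
      intro h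
      apply hnc
      rw [PySem.Dict.contains_eq_decide_mem_keys]
      have hmem : q.1 ∈ (mergePayloadA PySem.Dict.empty left).keys := by
        simp only [PySem.Dict.keys, hitems1, List.map_map]
        obtain ⟨p, hp, he⟩ := List.mem_map.mp h
        exact List.mem_map.mpr ⟨p, List.mem_filter.mpr ⟨hp, by simp [he, hq1]⟩, he⟩
      simp [hmem]
    have hgL : (PySem.Dict.mk left).get? q.1 = none := by
      rw [PySem.Dict.get?_eq_none_iff_not_mem_keys]
      simpa [PySem.Dict.keys_mk] using hnotL
    have hgR : (PySem.Dict.mk right).get? q.1 = some q.2 :=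
      PySem.Dict.get?_of_mem_items (PySem.Dict.mk right)
        (by simpa using hqR) (by simpa [PySem.Dict.keys_mk] using hR)
    simp only [Function.comp, PySem.Dict.getD, hgL, Option.getD_none, List.nil_append, hgR,
      Option.getD_some]

-- ========== B = mergeBSpec ==========

theorem set_contains_iff {α : Type} [BEq α] [LawfulBEq α] (s : List α) (x : α) :
    PySem.Set.contains s x = true ↔ x ∈ s := by
  rw [PySem.Set.contains_eq_listContains]
  exact ⟨List.mem_of_elem_eq_true, List.elem_eq_true_of_mem⟩

theorem set_add_filter {α : Type} [BEq α] [LawfulBEq α] (p : α → Bool) (s : List α) (x : α) :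
    (PySem.Set.add s x).filter p = if p x then PySem.Set.add (s.filter p) x else s.filter p := by
  by_cases hc : PySem.Set.contains s x = true
  · have hx : x ∈ s := (set_contains_iff s x).mp hc
    rw [PySem.Set.add, if_pos hc]
    cases hp : p x with
    | false => simp
    | true =>
      have hxf : x ∈ s.filter p := List.mem_filter.mpr ⟨hx, hp⟩
      rw [if_pos rfl, PySem.Set.add, if_pos ((set_contains_iff _ x).mpr hxf)]
  · have hx : x ∉ s := fun h => hc ((set_contains_iff s x).mpr h)
    rw [PySem.Set.add, if_neg hc, List.filter_append]
    cases hp : p x with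
    | false => simp [hp]
    | true =>
      simp only [List.filter_cons, hp, if_pos, List.filter_nil, PySem.Set.add]
      have hxf : x ∉ s.filter p := fun h => hx (List.mem_of_mem_filter h)
      rw [if_neg (fun h => hxf ((set_contains_iff _ x).mp h))]

theorem set_update_filter {α : Type} [BEq α] [LawfulBEq α] (p : α → Bool) (l s : List α) :
    (PySem.Set.update s l).filter p = PySem.Set.update (s.filter p) (l.filter p) := by
  induction l generalizing s with
  | nil => rfl
  | cons x t ih =>
    have hu : PySem.Set.update s (x :: t) = PySem.Set.update (PySem.Set.add s x) t := rfl
    rw [hu, ih, set_add_filter, List.filter_cons]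
    cases hp : p x with
    | false => simp
    | true => simp only [if_pos]; rfl

theorem set_ofList_filter {α : Type} [BEq α] [LawfulBEq α] (p : α → Bool) (l : List α) :
    PySem.Set.ofList (l.filter p) = (PySem.Set.ofList l).filter p := by
  have h1 : PySem.Set.ofList l = PySem.Set.update [] l := rfl
  have h2 : PySem.Set.ofList (l.filter p) = PySem.Set.update [] (l.filter p) := rfl
  rw [h1, h2, set_update_filter]
  rfl

theorem set_add_map {α β : Type} [BEq α] [LawfulBEq α] [BEq β] [LawfulBEq β] (f : α → β)
    (hf : Function.Injective f) (s : List α) (x : α) :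
    PySem.Set.add (s.map f) (f x) = (PySem.Set.add s x).map f := by
  have hcc : PySem.Set.contains (s.map f) (f x) = PySem.Set.contains s x := by
    by_cases h : x ∈ s
    · rw [(set_contains_iff _ _).mpr (List.mem_map_of_mem h), (set_contains_iff _ _).mpr h]
    · have h2 : f x ∉ s.map f := by
        intro hm
        obtain ⟨y, hy, he⟩ := List.mem_map.mp hm
        exact h (hf he ▸ hy)
      rw [eq_false_of_ne_true (fun hh => h2 ((set_contains_iff _ _).mp hh)),
          eq_false_of_ne_true (fun hh => h ((set_contains_iff _ _).mp hh))]
  rw [PySem.Set.add, PySem.Set.add, hcc]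
  cases h : PySem.Set.contains s x with
  | true => simp
  | false => simp

theorem set_ofList_map_inj {α β : Type} [BEq α] [LawfulBEq α] [BEq β] [LawfulBEq β] (f : α → β)
    (hf : Function.Injective f) (l : List α) :
    PySem.Set.ofList (l.map f) = (PySem.Set.ofList l).map f := by
  suffices h : ∀ s : List α, PySem.Set.update (s.map f) (l.map f) = (PySem.Set.update s l).map f by
    exact h []
  induction l with
  | nil => intro s; rfl
  | cons x t ih =>
    intro s
    have h1 : PySem.Set.update (s.map f) ((x :: t).map f) =
        PySem.Set.update (PySem.Set.add (s.map f) (f x)) (t.map f) := rfl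
    rw [h1, set_add_map f hf, ih]
    rfl

theorem set_update_of_subset {α : Type} [BEq α] [LawfulBEq α] (l s : List α)
    (h : ∀ x ∈ l, x ∈ s) : PySem.Set.update s l = s := by
  induction l generalizing s with
  | nil => rfl
  | cons x t ih =>
    have hadd : PySem.Set.add s x = s := by
      rw [PySem.Set.add, if_pos ((set_contains_iff s x).mpr (h x (List.mem_cons_self)))]
    have hu : PySem.Set.update s (x :: t) = PySem.Set.update (PySem.Set.add s x) t := rfl
    rw [hu, hadd]
    exact ih s (fun y hy => h y (List.mem_cons_of_mem x hy))

theorem getD_foldl_insert_nil (l : List String) (d : PySem.Dict String (List String))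
    (h : ∀ c, d.getD c [] = []) :
    ∀ c, (l.foldl (fun d k => d.insert k ([] : List String)) d).getD c [] = [] := by
  induction l generalizing d with
  | nil => exact h
  | cons x t ih =>
    rw [List.foldl_cons]
    apply ih
    intro c
    by_cases hc : x = c
    · subst hc
      simp [PySem.Dict.getD, PySem.Dict.get?_insert_self]
    · rw [PySem.Dict.getD, PySem.Dict.get?_insert_of_ne d [] (Ne.symm hc), ← PySem.Dict.getD, h c]

theorem side_filter_nil (payload : List (String × List String)) (k : String)
    (h : k ∉ payload.map Prod.fst) :
    (payload.flatMap gpairB).filter (fun p => p.1 == k) = [] := by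
  induction payload with
  | nil => rfl
  | cons q rest ih =>
    simp only [List.map_cons, List.mem_cons, not_or] at h
    rw [List.flatMap_cons, List.filter_append, ih h.2, List.append_nil]
    unfold gpairB
    by_cases hq : q.1 = ""
    · simp [hq]
    · rw [if_neg hq, List.filter_map]
      have : (fun p : String × String => p.1 == k) ∘ (fun s => (q.1, s)) = fun _ => false := by
        funext s
        simp only [Function.comp]
        exact beq_eq_false_iff_ne.mpr (Ne.symm h.1)
      rw [this, List.filter_false, List.map_nil]

theorem side_filter (payload : List (String × List String)) (k : String)
    (hk : k ≠ "") (hnd : (payload.map Prod.fst).Nodup) :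
    (payload.flatMap gpairB).filter (fun p => p.1 == k) =
      (fvalP payload k).map (fun s => (k, s)) := by
  induction payload with
  | nil =>
    rw [fvalP_of_not_mem [] k (by simp)]
    rfl
  | cons q rest ih =>
    simp only [List.map_cons, List.nodup_cons] at hnd
    rw [List.flatMap_cons, List.filter_append, fvalP_cons]
    by_cases hq : q.1 = k
    · rw [if_pos hq, side_filter_nil rest k (hq ▸ hnd.1), List.append_nil]
      unfold gpairB
      rw [if_neg (hq ▸ hk), List.filter_map]
      have : (fun p : String × String => p.1 == k) ∘ (fun s => (q.1, s)) = fun _ => true := by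
        funext s; simp [hq]
      rw [this, List.filter_true, hq]
    · rw [if_neg hq, ih hnd.2]
      have hblock : (gpairB q).filter (fun p => p.1 == k) = [] := by
        unfold gpairB
        by_cases hqe : q.1 = ""
        · simp [hqe]
        · rw [if_neg hqe, List.filter_map]
          have : (fun p : String × String => p.1 == k) ∘ (fun s => (q.1, s)) = fun _ => false := by
            funext s
            simp only [Function.comp]
            exact beq_eq_false_iff_ne.mpr hq
          rw [this, List.filter_false, List.map_nil]
      rw [hblock, List.nil_append]

-- the per-key core: the k-block of the globally sorted pair set IS sorted(set(values of k))
theorem perkey (left right : List (String × List String))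
    (hL : (left.map Prod.fst).Nodup) (hR : (right.map Prod.fst).Nodup)
    (k : String) (hk : k ≠ "") :
    ((flatB left right).filter (fun p => p.1 == k)).map (fun p => p.2) =
      PySem.List.sorted
        (PySem.Set.ofList
          (((PySem.Dict.mk left).getD k [] ++ (PySem.Dict.mk right).getD k []).filter (fun s => s ≠ "")))
        (fun s => s) false := by
  have hinj : Function.Injective (fun s : String => (k, s)) := by
    intro a b h; exact (Prod.mk.injEq _ _ _ _).mp h |>.2
  have hvals : (((PySem.Dict.mk left).getD k [] ++ (PySem.Dict.mk right).getD k []).filter (fun s => s ≠ ""))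
      = fvalP left k ++ fvalP right k := by rw [List.filter_append]; rfl
  set FP := (left ++ right).flatMap gpairB with hFP
  set vals := fvalP left k ++ fvalP right k with hvalsdef
  have hFPfilter : FP.filter (fun p => p.1 == k) = vals.map (fun s => (k, s)) := by
    rw [hFP, List.flatMap_append, List.filter_append,
        side_filter left k hk hL, side_filter right k hk hR, hvalsdef, List.map_append]
  have hsortperm : (flatB left right).Perm (PySem.Set.ofList FP) :=
    PySem.List.sorted_perm (PySem.Set.ofList FP) (fun p => p.2) false
  have hperm : (((flatB left right).filter (fun p => p.1 == k)).map (fun p => p.2)).Perm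
      (PySem.Set.ofList vals) := by
    have h2 := (hsortperm.filter (fun p => p.1 == k)).map (fun p : String × String => p.2)
    have h3 : ((PySem.Set.ofList FP).filter (fun p => p.1 == k)).map (fun p : String × String => p.2)
        = PySem.Set.ofList vals := by
      rw [← set_ofList_filter, hFPfilter, set_ofList_map_inj _ hinj, List.map_map]
      have : (fun p : String × String => p.2) ∘ (fun s : String => (k, s)) = id := rfl
      rw [this, List.map_id]
    exact h3 ▸ h2
  have hnd : (flatB left right).Nodup := hsortperm.symm.nodup (PySem.Set.nodup_ofList FP)
  have hle : (flatB left right).Pairwise (fun a b => a.2 ≤ b.2) :=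
    PySem.List.sorted_pairwise (PySem.Set.ofList FP) (fun p => p.2)
  have hcomb : (flatB left right).Pairwise (fun a b => a.2 ≤ b.2 ∧ a ≠ b) := hle.and hnd
  have hfilt : ((flatB left right).filter (fun p => p.1 == k)).Pairwise (fun a b => a.2 ≤ b.2 ∧ a ≠ b) :=
    List.Pairwise.sublist List.filter_sublist hcomb
  have hstrong : ((flatB left right).filter (fun p => p.1 == k)).Pairwise (fun a b => a.2 < b.2) := by
    refine List.Pairwise.imp_of_mem ?_ hfilt
    intro a b ha hb hab
    have ha1 : a.1 = k := by simpa using (List.mem_filter.mp ha).2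
    have hb1 : b.1 = k := by simpa using (List.mem_filter.mp hb).2
    refine lt_of_le_of_ne hab.1 ?_
    intro he
    exact hab.2 (Prod.ext (ha1.trans hb1.symm) he)
  have hpair : (((flatB left right).filter (fun p => p.1 == k)).map (fun p => p.2)).Pairwise
      (fun a b => a < b) := List.pairwise_map.mpr hstrong
  rw [hvals]
  exact (PySem.List.sorted_eq_of_perm_of_pairwise_lt _ _ _ hperm hpair).symm

theorem alt_eq (left right : List (String × List String))
    (hL : (left.map Prod.fst).Nodup) (hR : (right.map Prod.fst).Nodup) :
    merge_file_failures_alt left right = mergeBSpec left right := by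
  set klist := ((left ++ right).map Prod.fst).filter (fun k => decide (k ≠ "")) with hklist
  have hseedkeys : (seedB left right).keys = PySem.List.dedup klist := by
    unfold seedB
    rw [PySem.Dict.keys_foldl_insert klist (fun _ _ => []) PySem.Dict.empty,
        PySem.List.dedup_eq_ofList]
    rfl
  have hseednodup : (seedB left right).keys.Nodup := by
    unfold seedB
    exact PySem.Dict.nodup_keys_foldl_insert klist (fun _ _ => []) PySem.Dict.empty
      (by simp [PySem.Dict.empty, PySem.Dict.keys])
  have hseedgetD : ∀ c, (seedB left right).getD c [] = [] := by
    unfold seedB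
    exact getD_foldl_insert_nil klist PySem.Dict.empty (fun c => rfl)
  have hmemflat : ∀ p ∈ flatB left right, p.1 ∈ PySem.List.dedup klist := by
    intro p hp
    have hpFP : p ∈ (left ++ right).flatMap gpairB := by
      have h1 : p ∈ PySem.Set.ofList ((left ++ right).flatMap gpairB) :=
        (PySem.List.mem_sorted (PySem.Set.ofList ((left ++ right).flatMap gpairB))
          (fun p => p.2) false p).mp hp
      exact (PySem.Set.mem_ofList _ _).mp h1
    obtain ⟨q, hq, hpg⟩ := List.mem_flatMap.mp hpFP
    unfold gpairB at hpg
    by_cases hqe : q.1 = ""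
    · rw [if_pos hqe] at hpg
      exact absurd hpg (List.not_mem_nil)
    · rw [if_neg hqe] at hpg
      obtain ⟨s, hs, he2⟩ := List.mem_map.mp hpg
      have hp1 : p.1 = q.1 := by rw [← he2]
      have hkm : q.1 ∈ klist := by
        rw [hklist]
        exact List.mem_filter.mpr ⟨List.mem_map_of_mem hq, by simp [hqe]⟩
      rw [hp1]
      exact (PySem.List.mem_dedup _ _).mpr hkm
  unfold merge_file_failures_alt
  set D1 := (flatB left right).foldl (fun d p => d.modify p.1 [] (fun l => l ++ [p.2])) (seedB left right) with hD1
  have hD1keys : D1.keys = PySem.List.dedup klist := by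
    rw [hD1, PySem.Dict.keys_foldl_modify_key (flatB left right) (fun p => p.1) []
      (fun _ p => fun l => l ++ [p.2]) (seedB left right), hseedkeys]
    apply set_update_of_subset
    intro x hx
    obtain ⟨p, hp, he⟩ := List.mem_map.mp hx
    exact he ▸ hmemflat p hp
  have hD1nodup : D1.keys.Nodup := by
    rw [hD1]
    exact PySem.Dict.nodup_keys_foldl_modify_key (flatB left right) (fun p => p.1) []
      (fun _ p => fun l => l ++ [p.2]) (seedB left right) hseednodup
  rw [PySem.Dict.items_eq_map_keys D1 hD1nodup [], hD1keys]
  unfold mergeBSpec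
  have hkl : ((left.map Prod.fst) ++ (right.map Prod.fst)).filter (fun k => decide (k ≠ "")) = klist := by
    rw [hklist, List.map_append]
  rw [hkl]
  apply List.map_congr_left
  intro k hkmem
  have hk : k ≠ "" := by
    have h1 := (PySem.List.mem_dedup _ _).mp hkmem
    have h2 := List.of_mem_filter (hklist ▸ h1)
    simpa using h2
  have hgd : D1.getD k [] = ((flatB left right).filter (fun p => p.1 == k)).map (fun p => p.2) := by
    rw [hD1, PySem.Dict.getD_foldl_modify_append (flatB left right) (seedB left right) k,
        hseedgetD k, List.nil_append]
  rw [hgd, perkey left right hL hR k hk]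

-- ===== VERDICT (by name: the statement is the Claim_ definition above) =====
theorem merge_file_failures_spec : Claim_equal_merge_file_failures := by
  intro left right _ hpre
  show _ = _
  rw [merge_eq left right hpre.1 hpre.2, alt_eq left right hpre.1 hpre.2]
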